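-- pv_equiv track=rewrite | github.com/open-rmf/rmf_demos | rmf_demos_tasks/rmf_demos_tasks/dispatch_multistop.py | list_of_labels
-- ===== SOURCE A (Python) =====
-- def list_of_labels(arg):
--     final_kvs = []
--     temp_kvs = []
--     for p in arg.split(","):
--         if "=" in p:
--             final_kvs.append(",".join(temp_kvs))
--             temp_kvs.clear()
--             temp_kvs.append(p)
--         else:
--             temp_kvs.append(p)
--     final_kvs.append(",".join(temp_kvs))
--     temp_kvs.clear()
--     return final_kvs[1:]
-- ===== SOURCE B (Python) =====
-- def list_of_labels(arg):
--     pieces = arg.split(',')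
--     starts = [i for i, p in enumerate(pieces) if '=' in p]
--     ends = starts[1:] + [len(pieces)]
--     return [','.join(pieces[s:e]) for s, e in zip(starts, ends)]
-- ===== Notes on version B (the rewrite author's own statement) =====
-- stated objective: alternative
-- what changed: Replaces A's stateful accumulator pass (dummy first group dropped via [1:]) by an index-based decomposition: compute the start indices of '='-pieces once, then emit each group as a join of a slice between consecutive starts.
import Mathlib
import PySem

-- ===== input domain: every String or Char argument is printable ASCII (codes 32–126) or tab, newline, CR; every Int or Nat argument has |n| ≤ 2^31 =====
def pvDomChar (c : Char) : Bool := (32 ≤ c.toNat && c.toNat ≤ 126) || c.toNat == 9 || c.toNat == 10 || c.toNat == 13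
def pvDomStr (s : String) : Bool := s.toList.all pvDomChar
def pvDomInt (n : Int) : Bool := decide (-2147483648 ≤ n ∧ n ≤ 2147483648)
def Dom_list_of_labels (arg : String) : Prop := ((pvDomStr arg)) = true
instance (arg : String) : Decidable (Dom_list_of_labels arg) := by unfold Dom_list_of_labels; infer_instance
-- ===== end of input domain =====

-- B replaces A's stateful accumulator pass with an index-based decomposition (start indices of '='-pieces, then joined slices); same cost, no speed claim.

-- ===== PORT A =====
def list_of_labels (arg : String) : List String :=
  let pieces := (PySem.Str.split? arg ",").getD []   -- sep "," ≠ "", so split? is always `some`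
  let st := pieces.foldl
    (fun (s : List String × List String) p =>
      if PySem.Str.isIn "=" p
      then (s.1 ++ [PySem.Str.join "," s.2], [p])
      else (s.1, s.2 ++ [p]))
    ([], [])
  PySem.List.slice (st.1 ++ [PySem.Str.join "," st.2]) (some 1) none

-- ===== PORT B =====
def list_of_labels_alt (arg : String) : List String :=
  let pieces := (PySem.Str.split? arg ",").getD []   -- sep "," ≠ "", so split? is always `some`
  let starts := ((PySem.List.enumerate pieces 0).filter (fun ip => PySem.Str.isIn "=" ip.2)).map (·.1)
  let ends := starts.tail ++ [PySem.List.len pieces]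
  (starts.zip ends).map (fun se => PySem.Str.join "," (PySem.List.slice pieces (some se.1) (some se.2)))

-- ===== PRECONDITION & SPEC =====
def Spec_list_of_labels (arg : String) (out : List String) : Prop := out = list_of_labels_alt arg
instance (arg : String) (out : List String) : Decidable (Spec_list_of_labels arg out) := by unfold Spec_list_of_labels; infer_instance

-- ===== CLAIM (what is proved, stated in full; the proofs are below) =====
def Claim_equal_list_of_labels : Prop := ∀ (arg : String), Dom_list_of_labels arg → Spec_list_of_labels arg (list_of_labels arg)

-- ===== LEMMAS AND PROOFS =====

/-- Group structure of a piece list: `(completed groups, prefix before the first '='-piece)`. -/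
def brL (q : String → Bool) : List String → List (List String) × List String
  | [] => ([], [])
  | p :: ps =>
    let r := brL q ps
    if q p then ((p :: r.2) :: r.1, []) else (r.1, p :: r.2)

/-- Nat-level start indices of the pieces satisfying `q`. -/
def SN (q : String → Bool) : List String → List Nat
  | [] => []
  | p :: ps => if q p then 0 :: (SN q ps).map (· + 1) else (SN q ps).map (· + 1)

theorem brL_of_SN_nil (q : String → Bool) (ps : List String) (h : SN q ps = []) :
    brL q ps = ([], ps) := by
  induction ps with
  | nil => rfl
  | cons p ps ih =>
    cases hq : q p with
    | true => rw [SN, if_pos hq] at h; exact absurd h (by simp)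
    | false =>
      rw [SN, if_neg (by simp [hq])] at h
      simp only [List.map_eq_nil_iff] at h
      simp [brL, hq, ih h]

theorem brL_snd_eq_take (q : String → Bool) (ps : List String) :
    (brL q ps).2 = ps.take ((SN q ps).headD ps.length) := by
  induction ps with
  | nil => rfl
  | cons p ps ih =>
    cases hq : q p with
    | true => simp [brL, SN, hq]
    | false =>
      simp only [brL, SN, hq, Bool.false_eq_true, if_false]
      cases hS : SN q ps with
      | nil =>
        rw [hS] at ih
        simp [ih, List.take_of_length_le]
      | cons s0 S' =>
        rw [hS] at ih
        simp [ih]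

theorem chunks_eq_brL (q : String → Bool) (ps : List String) :
    ((SN q ps).zip ((SN q ps).tail ++ [ps.length])).map
      (fun se => (ps.drop se.1).take (se.2 - se.1)) = (brL q ps).1 := by
  induction ps with
  | nil => rfl
  | cons p ps ih =>
    cases hq : q p with
    | true =>
      simp only [SN, hq, if_true, brL]
      cases hS : SN q ps with
      | nil =>
        have hbr := brL_of_SN_nil q ps hS
        simp [hbr, List.take_of_length_le]
      | cons s0 S' =>
        have hsnd := brL_snd_eq_take q ps
        rw [hS] at hsnd
        simp only [List.map_cons, List.tail_cons, List.cons_append, List.zip_cons_cons,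
          List.map_cons]
        congr 1
        · simp [hsnd]
        · have h3 : (S'.map (· + 1)) ++ [(p :: ps).length] = ((s0 :: S').tail ++ [ps.length]).map (· + 1) := by
            simp
          have h2 : (s0 + 1) :: S'.map (· + 1) = (s0 :: S').map (· + 1) := by simp
          rw [h2, h3, ← hS, List.zip_map, List.map_map, ← ih]
          apply List.map_congr_left
          intro se _
          simp
    | false =>
      simp only [SN, hq, Bool.false_eq_true, if_false, brL]
      have h3 : ((SN q ps).map (· + 1)).tail ++ [(p :: ps).length]
          = ((SN q ps).tail ++ [ps.length]).map (· + 1) := by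
        simp [List.map_tail]
      rw [h3, List.zip_map, List.map_map, ← ih]
      apply List.map_congr_left
      intro se _
      simp

theorem foldA_eq (q : String → Bool) (ps : List String) (f t : List String) :
    (ps.foldl
      (fun (s : List String × List String) p =>
        if q p then (s.1 ++ [PySem.Str.join "," s.2], [p]) else (s.1, s.2 ++ [p])) (f, t)).1
    ++ [PySem.Str.join ","
        (ps.foldl
          (fun (s : List String × List String) p =>
            if q p then (s.1 ++ [PySem.Str.join "," s.2], [p]) else (s.1, s.2 ++ [p])) (f, t)).2]
      = f ++ PySem.Str.join "," (t ++ (brL q ps).2) :: ((brL q ps).1).map (PySem.Str.join ",") := by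
  induction ps generalizing f t with
  | nil => simp [brL]
  | cons p ps ih =>
    cases hq : q p with
    | true =>
      simp only [List.foldl_cons, hq, if_true, brL]
      rw [ih]
      simp
    | false =>
      simp only [List.foldl_cons, hq, Bool.false_eq_true, if_false, brL]
      rw [ih]
      simp

theorem starts_eq_SN (q : String → Bool) (ps : List String) (s : Int) :
    ((PySem.List.enumerate ps s).filter (fun ip => q ip.2)).map (·.1)
      = (SN q ps).map (fun (n : Nat) => s + (n : Int)) := by
  induction ps generalizing s with
  | nil => simp [PySem.List.enumerate_nil, SN]
  | cons p ps ih =>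
    rw [PySem.List.enumerate_cons]
    have hrec : ((PySem.List.enumerate ps (s + 1)).filter (fun ip => q ip.2)).map (·.1)
        = ((SN q ps).map (· + 1)).map (fun (n : Nat) => s + (n : Int)) := by
      rw [ih (s + 1), List.map_map]
      apply List.map_congr_left
      intro n _
      simp
      ring
    cases hq : q p with
    | true =>
      rw [List.filter_cons_of_pos (by simp [hq])]
      simp only [List.map_cons, SN, hq, if_true, hrec]
      simp
    | false =>
      rw [List.filter_cons_of_neg (by simp [hq])]
      simp only [SN, hq, Bool.false_eq_true, if_false, hrec]

theorem A_eq (q : String → Bool) (ps : List String) :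
    PySem.List.slice
      ((ps.foldl
        (fun (s : List String × List String) p =>
          if q p then (s.1 ++ [PySem.Str.join "," s.2], [p]) else (s.1, s.2 ++ [p])) ([], [])).1
        ++ [PySem.Str.join ","
          (ps.foldl
            (fun (s : List String × List String) p =>
              if q p then (s.1 ++ [PySem.Str.join "," s.2], [p]) else (s.1, s.2 ++ [p])) ([], [])).2])
      (some 1) none
    = ((brL q ps).1).map (PySem.Str.join ",") := by
  rw [PySem.List.slice_from_one, foldA_eq q ps [] []]
  simp

theorem B_eq (q : String → Bool) (ps : List String) :
    (((((PySem.List.enumerate ps 0).filter (fun ip => q ip.2)).map (·.1))).zip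
        ((((PySem.List.enumerate ps 0).filter (fun ip => q ip.2)).map (·.1)).tail
          ++ [PySem.List.len ps])).map
      (fun se => PySem.Str.join "," (PySem.List.slice ps (some se.1) (some se.2)))
    = ((brL q ps).1).map (PySem.Str.join ",") := by
  have hS := starts_eq_SN q ps 0
  have hS' : ((PySem.List.enumerate ps 0).filter (fun ip => q ip.2)).map (·.1)
      = (SN q ps).map (fun (n : Nat) => (n : Int)) := by
    rw [hS]; simp
  rw [hS']
  have htail : ((SN q ps).map (fun (n : Nat) => (n : Int))).tail ++ [PySem.List.len ps]
      = ((SN q ps).tail ++ [ps.length]).map (fun (n : Nat) => (n : Int)) := by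
    simp [List.map_tail, PySem.List.len]
  rw [htail, List.zip_map, List.map_map]
  have hptw : ∀ se ∈ (SN q ps).zip ((SN q ps).tail ++ [ps.length]),
      ((fun se => PySem.Str.join "," (PySem.List.slice ps (some se.1) (some se.2)))
        ∘ Prod.map (fun (n : Nat) => (n : Int)) (fun (n : Nat) => (n : Int))) se
      = (PySem.Str.join "," ∘ fun se => (ps.drop se.1).take (se.2 - se.1)) se := by
    intro se _
    simp [PySem.List.slice_natCast]
  rw [List.map_congr_left hptw, ← List.map_map, chunks_eq_brL]

-- ===== VERDICT (by name: the statement is the Claim_ definition above) =====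
theorem list_of_labels_spec : Claim_equal_list_of_labels := by
  intro arg _
  show list_of_labels arg = list_of_labels_alt arg
  unfold list_of_labels list_of_labels_alt
  exact (A_eq (fun p => PySem.Str.isIn "=" p) ((PySem.Str.split? arg ",").getD [])).trans
    (B_eq (fun p => PySem.Str.isIn "=" p) ((PySem.Str.split? arg ",").getD [])).symm
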